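-- pv_equiv track=rewrite | github.com/EmmaAye/DAMO_699-4-Capstone-Project | notebooks/predictive_analysis/rq1_trn_baseline_model.py | map_to_original_feature
-- ===== SOURCE A (Python) =====
-- numeric_features = [
--     'hour',
--     'day_of_week',
--     'month',
--     'year',
--     'unified_alarm_level'
-- ]
--
-- categorical_features = [
--     'season',
--     'incident_category',
--     'unified_call_source',
--     'location_area'
-- ]
--
-- def map_to_original_feature(expanded_name):
--     for cat in categorical_features:
--         if expanded_name.startswith(f"{cat}_vec"):
--             return cat
--     for num in numeric_features:
--         if expanded_name == num:
--             return num
--     return expanded_name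
-- ===== SOURCE B (Python) =====
-- _CATEGORICAL = {'season', 'incident_category', 'unified_call_source', 'location_area'}
--
-- def map_to_original_feature(expanded_name):
--     idx = expanded_name.find("_vec")
--     if idx != -1:
--         key = expanded_name[:idx]
--         if key in _CATEGORICAL:
--             return key
--     return expanded_name
-- ===== Notes on version B (the rewrite author's own statement) =====
-- stated objective: simpler
-- what changed: Replaces the ordered prefix-scan over the categorical list (and the redundant numeric equality scan) by a single find of the '_vec' separator plus one set-membership test of the extracted key.
import Mathlib
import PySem

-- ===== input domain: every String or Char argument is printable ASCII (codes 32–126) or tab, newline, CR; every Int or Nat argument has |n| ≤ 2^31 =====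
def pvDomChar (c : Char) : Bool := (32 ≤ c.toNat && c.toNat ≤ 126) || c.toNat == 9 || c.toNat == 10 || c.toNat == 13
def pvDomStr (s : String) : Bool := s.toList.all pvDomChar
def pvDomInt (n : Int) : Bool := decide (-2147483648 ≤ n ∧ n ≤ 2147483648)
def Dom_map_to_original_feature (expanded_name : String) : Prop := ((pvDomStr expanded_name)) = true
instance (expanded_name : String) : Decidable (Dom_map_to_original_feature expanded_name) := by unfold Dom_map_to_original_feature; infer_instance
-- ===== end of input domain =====

-- B replaces A's prefix-scan over the categorical list (and the redundant numeric
-- equality scan) by one find of "_vec" plus a set-membership test of the extracted key.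


-- ===== PORT A =====
-- the module-level feature lists
def numeric_features : List String := ["hour", "day_of_week", "month", "year", "unified_alarm_level"]
def categorical_features : List String := ["season", "incident_category", "unified_call_source", "location_area"]

-- first for-loop: return the first cat with expanded_name.startswith(cat + "_vec")
def mapCatLoop (expanded_name : String) : List String → Option String
  | [] => none
  | cat :: rest =>
      if PySem.Str.startswith expanded_name (cat ++ "_vec") then some cat
      else mapCatLoop expanded_name rest

-- second for-loop: return the first num with expanded_name == num
def mapNumLoop (expanded_name : String) : List String → Option String
  | [] => none
  | num :: rest =>
      if expanded_name = num then some num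
      else mapNumLoop expanded_name rest

def map_to_original_feature (expanded_name : String) : String :=
  match mapCatLoop expanded_name categorical_features with
  | some cat => cat
  | none =>
      match mapNumLoop expanded_name numeric_features with
      | some num => num
      | none => expanded_name

-- ===== PORT B =====
def bCategoricalSet : PySem.Set String :=
  PySem.Set.ofList ["season", "incident_category", "unified_call_source", "location_area"]

def map_to_original_feature_alt (expanded_name : String) : String :=
  let idx := PySem.Str.find expanded_name "_vec"
  if idx ≠ -1 then
    let key := PySem.Str.slice expanded_name none (some idx)
    if key ∈ bCategoricalSet then key
    else expanded_name
  else expanded_name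

-- ===== PRECONDITION & SPEC =====
def Spec_map_to_original_feature (expanded_name : String) (out : String) : Prop := out = map_to_original_feature_alt expanded_name
instance (expanded_name : String) (out : String) : Decidable (Spec_map_to_original_feature expanded_name out) := by unfold Spec_map_to_original_feature; infer_instance

-- ===== CLAIM (what is proved, stated in full; the proofs are below) =====
def Claim_equal_map_to_original_feature : Prop := ∀ (expanded_name : String), Dom_map_to_original_feature expanded_name → Spec_map_to_original_feature expanded_name (map_to_original_feature expanded_name)

-- ===== LEMMAS AND PROOFS =====

-- find points at k when the pattern occurs at k and nowhere earlier
theorem chars_find_eq (l sub : List Char) (k : Nat)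
    (h1 : sub <+: l.drop k) (h2 : ∀ i, i < k → ¬ sub <+: l.drop i) :
    PySem.Chars.find l sub = (k : Int) := by
  have hinf : sub <:+: l := h1.isInfix.trans (List.drop_suffix k l).isInfix
  have hnn : 0 ≤ PySem.Chars.find l sub := (PySem.Chars.find_nonneg_iff l sub).2 hinf
  obtain ⟨hp, hmin⟩ := PySem.Chars.find_spec hnn
  set m := (PySem.Chars.find l sub).toNat with hm
  have : m = k := by
    rcases Nat.lt_trichotomy m k with h | h | h
    · exact absurd hp (h2 m h)
    · exact h
    · exact absurd h1 (hmin k h)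
  omega

-- the pattern occurring at position pre.length of pre ++ pat ++ t, and at no
-- earlier position of the fixed part pre ++ pat, occurs first at pre.length
theorem find_after_prefix (pre pat t : List Char)
    (hno : ∀ i, i < pre.length → ((pre ++ pat).drop i).take pat.length ≠ pat) :
    PySem.Chars.find (pre ++ pat ++ t) pat = (pre.length : Int) := by
  apply chars_find_eq
  · rw [List.append_assoc, List.drop_append_of_le_length (le_refl _), List.drop_length]
    exact List.prefix_append pat t
  · intro i hi hpre
    apply hno i hi
    have hlen : pat.length ≤ ((pre ++ pat).drop i).length := by
      rw [List.length_drop, List.length_append]; omega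
    have hsplit : List.drop i (pre ++ pat ++ t) = List.drop i (pre ++ pat) ++ t :=
      List.drop_append_of_le_length (by rw [List.length_append]; omega)
    have heq := List.prefix_iff_eq_take.mp hpre
    rw [hsplit, List.take_append_of_le_length hlen] at heq
    exact heq.symm

theorem take_pre (pre pat t : List Char) :
    (pre ++ pat ++ t).take pre.length = pre := by
  rw [List.append_assoc, List.take_append_of_le_length (le_refl _), List.take_length]

-- A's startswith (cat ++ "_vec") case forces B down the same branch
theorem b_on_match (s : String) (cat : String)
    (hcat : cat ∈ categorical_features)
    (h : PySem.Str.startswith s (cat ++ "_vec") = true) :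
    map_to_original_feature_alt s = cat := by
  have hpre : (cat ++ "_vec").toList <+: s.toList := by
    simpa using (PySem.Chars.startswith_iff _ _).mp (by simpa using h)
  obtain ⟨t, ht⟩ := hpre
  have hsl : s.toList = cat.toList ++ "_vec".toList ++ t := by
    simpa using ht.symm
  have hfind : PySem.Chars.find s.toList "_vec".toList = (cat.toList.length : Int) := by
    rw [hsl]
    apply find_after_prefix
    fin_cases hcat <;> decide
  have hkey : (PySem.Str.slice s none (some (PySem.Str.find s "_vec"))).toList = cat.toList := by
    rw [PySem.Str.toList_slice]
    simp only [PySem.Chars.slice_eq_listSlice]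
    have : PySem.Str.find s "_vec" = (cat.toList.length : Int) := by
      simpa using hfind
    rw [this, PySem.List.slice_to_natCast, hsl, take_pre]
  have hkey' : PySem.Str.slice s none (some (PySem.Str.find s "_vec")) = cat := by
    have := congrArg String.ofList hkey
    simpa using this
  have hne : PySem.Str.find s "_vec" ≠ -1 := by
    have : PySem.Str.find s "_vec" = (cat.toList.length : Int) := by simpa using hfind
    rw [this]
    fin_cases hcat <;> decide
  unfold map_to_original_feature_alt
  simp only [hne, if_true, ne_eq, not_false_iff, hkey']
  have : cat ∈ bCategoricalSet := by fin_cases hcat <;> decide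
  simp [this]

-- when no categorical prefix matches, B returns the input unchanged
theorem b_on_no_match (s : String)
    (h : ∀ cat ∈ categorical_features, PySem.Str.startswith s (cat ++ "_vec") = false) :
    map_to_original_feature_alt s = s := by
  unfold map_to_original_feature_alt
  simp only []
  split_ifs with h1 h2
  · -- the "_vec" key was found and lies in the categorical set: contradiction with h
    exfalso
    have hvec : ("_vec" : String).toList = ['_', 'v', 'e', 'c'] := rfl
    have h1' : PySem.Chars.find s.toList "_vec".toList ≠ -1 := by
      simpa using h1
    have hnn : 0 ≤ PySem.Chars.find s.toList "_vec".toList := by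
      have := PySem.Chars.neg_one_le_find s.toList "_vec".toList
      omega
    obtain ⟨hp, -⟩ := PySem.Chars.find_spec hnn
    set m := (PySem.Chars.find s.toList "_vec".toList).toNat with hm
    set key := PySem.Str.slice s none (some (PySem.Str.find s "_vec")) with hkeydef
    have hkeyl : key.toList = s.toList.take m := by
      rw [hkeydef, PySem.Str.toList_slice]
      simp only [PySem.Chars.slice_eq_listSlice]
      have hfi : PySem.Str.find s "_vec" = ((m : Nat) : Int) := by
        simp only [PySem.Str.find_eq]
        omega
      rw [hfi, PySem.List.slice_to_natCast]
    have hcases : key ∈ categorical_features := by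
      have : key ∈ bCategoricalSet := h2
      revert this
      unfold bCategoricalSet categorical_features
      intro hmem
      simpa [PySem.Set.mem_ofList] using hmem
    have hstart : PySem.Str.startswith s (key ++ "_vec") = true := by
      obtain ⟨t, htt⟩ := hp
      rw [PySem.Str.startswith_eq]
      apply (PySem.Chars.startswith_iff _ _).mpr
      refine ⟨t, ?_⟩
      have : (key ++ "_vec").toList = s.toList.take m ++ "_vec".toList := by
        simp [hkeyl]
      rw [this, List.append_assoc, htt, List.take_append_drop]
    have := h key hcases
    rw [this] at hstart
    exact absurd hstart (by simp)
  · rfl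
  · rfl

-- A's categorical loop: some cat exactly when a member's startswith fires
theorem catLoop_none (s : String) (cs : List String)
    (h : ∀ cat ∈ cs, PySem.Str.startswith s (cat ++ "_vec") = false) :
    mapCatLoop s cs = none := by
  induction cs with
  | nil => rfl
  | cons c rest ih =>
      unfold mapCatLoop
      rw [h c (by simp)]
      simp only [Bool.false_eq_true, if_false]
      exact ih (fun cat hm => h cat (by simp [hm]))

-- A's numeric loop returns the input itself (or nothing)
theorem numLoop_val (s : String) (ns : List String) :
    mapNumLoop s ns = none ∨ mapNumLoop s ns = some s := by
  induction ns with
  | nil => exact Or.inl rfl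
  | cons n rest ih =>
      unfold mapNumLoop
      by_cases hn : s = n
      · subst hn; simp
      · simpa [hn] using ih

-- ===== VERDICT (by name: the statement is the Claim_ definition above) =====
theorem map_to_original_feature_spec : Claim_equal_map_to_original_feature := by
  intro s _
  unfold Spec_map_to_original_feature
  by_cases hmatch : ∀ cat ∈ categorical_features, PySem.Str.startswith s (cat ++ "_vec") = false
  · -- no categorical prefix: both return s
    rw [b_on_no_match s hmatch]
    unfold map_to_original_feature
    rw [catLoop_none s _ hmatch]
    rcases numLoop_val s numeric_features with h | h <;> simp [h]
  · -- some categorical prefix fires; take the first one A's loop reaches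
    push Not at hmatch
    obtain ⟨cat0, hcat0, hsw0⟩ := hmatch
    have hsw0' : PySem.Str.startswith s (cat0 ++ "_vec") = true := by
      cases hb : PySem.Str.startswith s (cat0 ++ "_vec") with
      | false => exact absurd hb hsw0
      | true => rfl
    -- the loop returns some cat with startswith true
    have : ∃ cat ∈ categorical_features,
        PySem.Str.startswith s (cat ++ "_vec") = true ∧ mapCatLoop s categorical_features = some cat := by
      by_cases h1 : PySem.Str.startswith s ("season" ++ "_vec") = true
      · exact ⟨"season", by simp [categorical_features], h1, by simp_all [mapCatLoop, categorical_features]⟩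
      · by_cases h2 : PySem.Str.startswith s ("incident_category" ++ "_vec") = true
        · exact ⟨"incident_category", by simp [categorical_features], h2,
            by simp_all [mapCatLoop, categorical_features]⟩
        · by_cases h3 : PySem.Str.startswith s ("unified_call_source" ++ "_vec") = true
          · exact ⟨"unified_call_source", by simp [categorical_features], h3,
              by simp_all [mapCatLoop, categorical_features]⟩
          · by_cases h4 : PySem.Str.startswith s ("location_area" ++ "_vec") = true
            · exact ⟨"location_area", by simp [categorical_features], h4,
                by simp_all [mapCatLoop, categorical_features]⟩
            · exfalso
              fin_cases hcat0 <;> simp_all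
    obtain ⟨cat, hcmem, hsw, hloop⟩ := this
    rw [b_on_match s cat hcmem hsw]
    unfold map_to_original_feature
    rw [hloop]
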